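-- pv_equiv track=rewrite | github.com/ClaireWa/Python_NLP | Test_doc_using_LMs_perplexity.py | preprocess_line
-- ===== SOURCE A (Python) =====
-- import string as str
--
-- def preprocess_line(line):
--     good_chars = str.ascii_letters + '.' + str.digits + ' '
--     output = line
--     for i in range(len(line)):
--         if line[i] not in good_chars:
--             output = output.replace(line[i],'')
--
--         if line[i] in str.digits:
--             output = output.replace(line[i],'0')
--     output = output.lower()
--     return output
-- ===== SOURCE B (Python) =====
-- import string
--
--
-- def preprocess_line(line):
--     digits = set(string.digits)
--     keep = set(string.ascii_letters + '. ')
--     table = {}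
--     for c in set(line):
--         if c in digits:
--             table[ord(c)] = '0'
--         elif c not in keep:
--             table[ord(c)] = None
--     return line.translate(table).lower()
-- ===== Notes on version B (the rewrite author's own statement) =====
-- stated objective: faster
-- what changed: Instead of scanning the whole string with str.replace once per character of the line, B precomputes a translation table over the distinct characters (digit -> '0', other non-kept char -> delete) and produces the result in a single str.translate pass followed by lower().
import Mathlib
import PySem

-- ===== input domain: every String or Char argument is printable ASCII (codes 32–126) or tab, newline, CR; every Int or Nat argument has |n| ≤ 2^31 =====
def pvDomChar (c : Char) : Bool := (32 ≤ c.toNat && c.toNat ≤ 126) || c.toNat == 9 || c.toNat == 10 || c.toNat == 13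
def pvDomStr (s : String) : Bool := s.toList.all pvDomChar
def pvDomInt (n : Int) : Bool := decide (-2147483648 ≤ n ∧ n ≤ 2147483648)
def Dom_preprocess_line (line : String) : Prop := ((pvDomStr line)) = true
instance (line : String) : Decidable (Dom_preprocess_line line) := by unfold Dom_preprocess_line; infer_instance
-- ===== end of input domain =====

-- B replaces A's per-character whole-string .replace scans by one precomputed translation
-- table and a single translate pass over the line (same result).

-- ===== PORT A =====
def preprocess_line (line : String) : String :=
  let good_chars : String := "abcdefghijklmnopqrstuvwxyzABCDEFGHIJKLMNOPQRSTUVWXYZ.0123456789 "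
  let output :=
    (PySem.List.pyRange 0 (PySem.Str.len line)).foldl
      (fun output i =>
        -- i ranges over the valid indices of line, so line[i] never raises; .getD default only totalises
        let c : Char := (PySem.Str.pyGet? line i).getD default
        let output :=
          if PySem.Str.isIn (String.ofList [c]) good_chars = false then
            PySem.Str.replace output (String.ofList [c]) "" else output
        if PySem.Str.isIn (String.ofList [c]) "0123456789" = true then
          PySem.Str.replace output (String.ofList [c]) "0" else output)
      line
  PySem.Str.lower output

-- ===== PORT B =====
def preprocess_line_alt (line : String) : String :=
  let digits : PySem.Set Char := PySem.Set.ofList "0123456789".toList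
  let keep : PySem.Set Char := PySem.Set.ofList "abcdefghijklmnopqrstuvwxyzABCDEFGHIJKLMNOPQRSTUVWXYZ. ".toList
  let table : PySem.Dict Int (Option Char) :=
    (PySem.Set.ofList line.toList).foldl
      (fun t c =>
        if digits.contains c then t.insert ((c.toNat : Int)) (some '0')
        else if keep.contains c = false then t.insert ((c.toNat : Int)) none
        else t)
      PySem.Dict.empty
  -- str.translate ported by hand (exact for this table: keys are code points; a missing key
  -- keeps the char, value None deletes it, a one-char string value substitutes it)
  let translated := line.toList.flatMap (fun c =>
    match table.get? ((c.toNat : Int)) with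
    | some none => []
    | some (some r) => [r]
    | none => [c])
  PySem.Str.lower (String.ofList translated)

-- ===== PRECONDITION & SPEC =====
def Spec_preprocess_line (line : String) (out : String) : Prop := out = preprocess_line_alt line
instance (line : String) (out : String) : Decidable (Spec_preprocess_line line out) := by unfold Spec_preprocess_line; infer_instance

-- ===== CLAIM (what is proved, stated in full; the proofs are below) =====
def Claim_equal_preprocess_line : Prop := ∀ (line : String), Dom_preprocess_line line → Spec_preprocess_line line (preprocess_line line)

-- ===== LEMMAS AND PROOFS =====

/-- The character lists both programs classify by. -/
def pvDigitsL : List Char := "0123456789".toList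
def pvKeepL : List Char := "abcdefghijklmnopqrstuvwxyzABCDEFGHIJKLMNOPQRSTUVWXYZ. ".toList
def pvGoodL : List Char := "abcdefghijklmnopqrstuvwxyzABCDEFGHIJKLMNOPQRSTUVWXYZ.0123456789 ".toList

/-- The common per-character effect of both programs (before lowercasing). -/
def pvF (c : Char) : List Char :=
  if c ∈ pvDigitsL then ['0'] else if c ∈ pvGoodL then [c] else []

lemma pv_good_perm : pvGoodL.Perm (pvDigitsL ++ pvKeepL) := by decide

lemma pv_mem_good_iff (x : Char) : x ∈ pvGoodL ↔ x ∈ pvDigitsL ∨ x ∈ pvKeepL := by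
  rw [pv_good_perm.mem_iff, List.mem_append]

lemma pv_char_toNat_inj (a b : Char) (h : a.toNat = b.toNat) : a = b := by
  have := Char.ofNat_toNat a
  rw [← this, h, Char.ofNat_toNat]

lemma pv_go_single (d : Char) (new : List Char) :
    ∀ (l : List Char) (fuel : Nat) (acc : List Char), l.length ≤ fuel →
      PySem.Chars.replace.go [d] new fuel l acc
        = acc.reverse ++ l.flatMap (fun x => if x = d then new else [x]) := by
  intro l
  induction l with
  | nil =>
    intro fuel acc _
    cases fuel <;> simp [PySem.Chars.replace.go]
  | cons c t ih =>
    intro fuel acc hle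
    cases fuel with
    | zero => simp at hle
    | succ fuel =>
      rw [PySem.Chars.replace.go]
      by_cases hc : c = d
      · subst hc
        simp [List.isPrefixOf, ih fuel _ (by simpa using hle)]
      · simp [List.isPrefixOf, hc, ih fuel _ (by simpa using hle), Ne.symm hc]

/-- Single-character `replace` is a flatMap substitution. -/
lemma pv_replace_single (s : List Char) (d : Char) (new : List Char) :
    PySem.Chars.replace s [d] new = s.flatMap (fun x => if x = d then new else [x]) := by
  rw [PySem.Chars.replace]
  simpa using pv_go_single d new s s.length [] le_rfl

/-- Single-character `in` is list membership. -/
lemma pv_isIn_single (d : Char) (s : List Char) :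
    PySem.Chars.isIn [d] s = decide (d ∈ s) := by
  by_cases h : d ∈ s
  · simp [h, PySem.Chars.isIn_iff_infix, List.singleton_infix_iff]
  · simp [h, PySem.Chars.isIn_eq_false_iff, List.singleton_infix_iff]

/-- A's loop body on the char level. -/
def pvStep (s : List Char) (d : Char) : List Char :=
  let s1 := if PySem.Chars.isIn [d] pvGoodL = false then PySem.Chars.replace s [d] [] else s
  if PySem.Chars.isIn [d] pvDigitsL = true then PySem.Chars.replace s1 [d] ['0'] else s1

/-- State of A's loop: the chars processed so far (the list `p`) are transformed, others kept. -/
def pvH (p : List Char) (x : Char) : List Char := if x ∈ p then pvF x else [x]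

lemma pvH_congr (p q : List Char) (h : ∀ x, x ∈ p ↔ x ∈ q) : pvH p = pvH q := by
  funext x; simp [pvH, h x]

lemma pv_step_lemma (all p : List Char) (d : Char) :
    pvStep (all.flatMap (pvH p)) d = all.flatMap (pvH (d :: p)) := by
  by_cases hd : d ∈ pvDigitsL
  · have hdg : d ∈ pvGoodL := (pv_mem_good_iff d).mpr (Or.inl hd)
    rw [pvStep]
    simp only [pv_isIn_single, hd, hdg, decide_true, Bool.true_eq_false, if_false]
    rw [pv_replace_single, List.flatMap_assoc]
    refine List.flatMap_congr (fun x _ => ?_)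
    by_cases hxp : x ∈ p
    · by_cases hxd : x = d
      · subst hxd; simp [pvH, hxp, pvF, hd]
      · have hxdp : x ∈ d :: p := List.mem_cons_of_mem _ hxp
        simp only [pvH, hxp, hxdp, if_pos]
        rw [pvF]
        split_ifs with h1 h2 <;> simp [hxd, ite_self]
    · by_cases hxd : x = d
      · subst hxd; simp [pvH, hxp, pvF, hd]
      · simp [pvH, hxp, hxd]
  · by_cases hdg : d ∈ pvGoodL
    · rw [pvStep]
      simp only [pv_isIn_single, hd, hdg, decide_true, decide_false, Bool.false_eq_true, if_false]
      refine List.flatMap_congr (fun x _ => ?_)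
      by_cases hxd : x = d
      · subst hxd; simp [pvH, pvF, hd, hdg]
      · simp [pvH, hxd]
    · have hdd : d ∉ pvDigitsL := hd
      rw [pvStep]
      simp only [pv_isIn_single, hd, hdg, decide_false, Bool.false_eq_true, if_false]
      rw [pv_replace_single, List.flatMap_assoc]
      refine List.flatMap_congr (fun x _ => ?_)
      have h0d : ('0' : Char) ≠ d := by
        intro h
        exact hdg (h ▸ (pv_mem_good_iff '0').mpr (Or.inl (by decide)))
      by_cases hxp : x ∈ p
      · by_cases hxd : x = d
        · subst hxd; simp [pvH, hxp, pvF, hd, hdg]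
        · have hxdp : x ∈ d :: p := List.mem_cons_of_mem _ hxp
          simp only [pvH, hxp, hxdp, if_pos]
          rw [pvF]
          split_ifs with h1 h2 <;> simp [hxd, h0d]
      · by_cases hxd : x = d
        · subst hxd; simp [pvH, hxp, pvF, hd, hdg]
        · simp [pvH, hxp, hxd]

lemma pv_loop_inv (all : List Char) : ∀ (r p : List Char),
    r.foldl pvStep (all.flatMap (pvH p)) = all.flatMap (pvH (r ++ p)) := by
  intro r
  induction r with
  | nil => intro p; simp
  | cons d r ih =>
    intro p
    have h1 : (d :: r).foldl pvStep (all.flatMap (pvH p))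
        = r.foldl pvStep (all.flatMap (pvH (d :: p))) := by
      simp [List.foldl_cons, pv_step_lemma]
    rw [h1, ih (d :: p), pvH_congr (r ++ d :: p) ((d :: r) ++ p) (by intro x; simp; tauto)]

/-- A's loop body on the String level, with the character already fetched. -/
def pvFStr (output : String) (c : Char) : String :=
  let output :=
    if PySem.Str.isIn (String.ofList [c]) "abcdefghijklmnopqrstuvwxyzABCDEFGHIJKLMNOPQRSTUVWXYZ.0123456789 " = false then
      PySem.Str.replace output (String.ofList [c]) "" else output
  if PySem.Str.isIn (String.ofList [c]) "0123456789" = true then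
    PySem.Str.replace output (String.ofList [c]) "0" else output

lemma pvFStr_toList (s : String) (c : Char) :
    (pvFStr s c).toList = pvStep s.toList c := by
  rw [pvFStr, pvStep]
  simp only [PySem.Str.isIn_eq, String.toList_ofList]
  rw [show ("abcdefghijklmnopqrstuvwxyzABCDEFGHIJKLMNOPQRSTUVWXYZ.0123456789 ".toList) = pvGoodL from rfl,
    show ("0123456789".toList) = pvDigitsL from rfl]
  split_ifs <;>
    simp [PySem.Str.toList_replace, String.toList_ofList,
      show ("".toList : List Char) = [] from rfl, show ("0".toList : List Char) = ['0'] from rfl]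

lemma pv_str_fold (l : List Char) : ∀ (s : String),
    (l.foldl pvFStr s).toList = l.foldl pvStep s.toList := by
  induction l with
  | nil => intro s; simp
  | cons c t ih => intro s; rw [List.foldl_cons, List.foldl_cons, ih, pvFStr_toList]

/-- A computes the flatMap of pvF, then lowercases. -/
lemma pvA_eq (line : String) :
    preprocess_line line = PySem.Str.lower (String.ofList (line.toList.flatMap pvF)) := by
  simp only [preprocess_line]
  have h1 : (PySem.List.pyRange 0 (PySem.Str.len line)).foldl
        (fun (acc : String) (j : Int) => pvFStr acc (PySem.List.pyGetD line.toList j default)) line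
      = line.toList.foldl pvFStr line := by
    rw [show PySem.Str.len line = PySem.List.len line.toList from by
      simp [PySem.Str.len_eq, PySem.List.len]]
    simpa using PySem.List.foldl_pyRange_pyGetD line.toList default pvFStr line (le_refl 0)
  have h2 : (line.toList.foldl pvFStr line).toList = line.toList.flatMap pvF := by
    rw [pv_str_fold]
    have h0 : line.toList.flatMap (pvH []) = line.toList := by
      rw [show pvH [] = (fun x => [x]) from funext fun x => by simp [pvH],
        List.flatMap_singleton']
    conv_lhs => rw [← h0]
    rw [pv_loop_inv]
    exact List.flatMap_congr (fun x hx => by simp [pvH, hx])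
  calc PySem.Str.lower
        ((PySem.List.pyRange 0 (PySem.Str.len line)).foldl
          (fun (acc : String) (j : Int) => pvFStr acc (PySem.List.pyGetD line.toList j default)) line)
      = PySem.Str.lower (line.toList.foldl pvFStr line) := by rw [h1]
    _ = PySem.Str.lower (String.ofList (line.toList.flatMap pvF)) := by
        simp only [PySem.Str.lower, String.toList_ofList]
        exact congrArg _ (congrArg _ h2)

lemma pv_set_contains (xs : List Char) (c : Char) :
    (PySem.Set.ofList xs : PySem.Set Char).contains c = decide (c ∈ xs) := by
  have h1 : (PySem.Set.ofList xs : PySem.Set Char).contains c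
      = decide (c ∈ (PySem.Set.ofList xs : PySem.Set Char)) := by
    rw [PySem.Set.contains]
    simp
  rw [h1]
  simp [PySem.Set.mem_ofList]

/-- B's table-building loop body. -/
def pvTStep (t : PySem.Dict Int (Option Char)) (c : Char) : PySem.Dict Int (Option Char) :=
  if (PySem.Set.ofList "0123456789".toList : PySem.Set Char).contains c then
    t.insert ((c.toNat : Int)) (some '0')
  else if (PySem.Set.ofList "abcdefghijklmnopqrstuvwxyzABCDEFGHIJKLMNOPQRSTUVWXYZ. ".toList : PySem.Set Char).contains c = false then
    t.insert ((c.toNat : Int)) none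
  else t

lemma pv_table_get (L : List Char) : ∀ (t : PySem.Dict Int (Option Char)) (c : Char),
    (L.foldl pvTStep t).get? ((c.toNat : Int)) =
      if c ∈ L ∧ (c ∈ pvDigitsL ∨ c ∉ pvKeepL) then
        some (if c ∈ pvDigitsL then some '0' else none)
      else t.get? ((c.toNat : Int)) := by
  induction L with
  | nil => intro t c; simp
  | cons d L ih =>
    intro t c
    rw [List.foldl_cons, ih]
    by_cases hmem : c ∈ L ∧ (c ∈ pvDigitsL ∨ c ∉ pvKeepL)
    · have h' : c ∈ d :: L ∧ (c ∈ pvDigitsL ∨ c ∉ pvKeepL) :=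
        ⟨List.mem_cons_of_mem _ hmem.1, hmem.2⟩
      rw [if_pos hmem, if_pos h']
    · rw [if_neg hmem]
      by_cases hcd : c = d
      · subst hcd
        rw [pvTStep]
        simp only [pv_set_contains]
        rw [show ("0123456789".toList) = pvDigitsL from rfl,
          show ("abcdefghijklmnopqrstuvwxyzABCDEFGHIJKLMNOPQRSTUVWXYZ. ".toList) = pvKeepL from rfl]
        by_cases h1 : c ∈ pvDigitsL
        · rw [if_pos (decide_eq_true h1)]
          have h' : c ∈ c :: L ∧ (c ∈ pvDigitsL ∨ c ∉ pvKeepL) := ⟨List.mem_cons_self, Or.inl h1⟩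
          rw [if_pos h', PySem.Dict.get?_insert_self, if_pos h1]
        · rw [if_neg (by simp only [decide_eq_true_eq]; exact h1)]
          by_cases h2 : c ∈ pvKeepL
          · rw [if_neg (by simp only [decide_eq_false_iff_not]; exact not_not_intro h2)]
            have h' : ¬ (c ∈ c :: L ∧ (c ∈ pvDigitsL ∨ c ∉ pvKeepL)) := by
              simp [h1, h2]
            rw [if_neg h']
          · rw [if_pos (decide_eq_false h2)]
            have h' : c ∈ c :: L ∧ (c ∈ pvDigitsL ∨ c ∉ pvKeepL) := ⟨List.mem_cons_self, Or.inr h2⟩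
            rw [if_pos h', PySem.Dict.get?_insert_self, if_neg h1]
      · have hkey : ((c.toNat : Int)) ≠ ((d.toNat : Int)) := by
          intro h; exact hcd (pv_char_toNat_inj _ _ (Int.natCast_inj.mp h))
        have hstep : (pvTStep t d).get? ((c.toNat : Int)) = t.get? ((c.toNat : Int)) := by
          rw [pvTStep]
          split_ifs <;> simp [PySem.Dict.get?_insert_of_ne _ _ hkey]
        rw [hstep]
        have h' : ¬ (c ∈ d :: L ∧ (c ∈ pvDigitsL ∨ c ∉ pvKeepL)) := by
          intro hx
          rcases List.mem_cons.mp hx.1 with h|h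
          · exact hcd h
          · exact hmem ⟨h, hx.2⟩
        rw [if_neg h']

/-- B computes the same flatMap, then lowercases. -/
lemma pvB_eq (line : String) :
    preprocess_line_alt line = PySem.Str.lower (String.ofList (line.toList.flatMap pvF)) := by
  simp only [preprocess_line_alt]
  refine congrArg _ (congrArg _ (List.flatMap_congr (fun c hc => ?_)))
  rw [show (fun (t : PySem.Dict Int (Option Char)) (c : Char) =>
      if (PySem.Set.ofList "0123456789".toList : PySem.Set Char).contains c = true then
        t.insert ((c.toNat : Int)) (some '0')
      else if (PySem.Set.ofList "abcdefghijklmnopqrstuvwxyzABCDEFGHIJKLMNOPQRSTUVWXYZ. ".toList : PySem.Set Char).contains c = false then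
        t.insert ((c.toNat : Int)) none
      else t) = pvTStep from rfl]
  rw [pv_table_get]
  have hcL : c ∈ (PySem.Set.ofList line.toList : PySem.Set Char) :=
    (PySem.Set.mem_ofList line.toList c).mpr hc
  by_cases h1 : c ∈ pvDigitsL
  · rw [if_pos ⟨hcL, Or.inl h1⟩, if_pos h1]
    simp [pvF, h1]
  · by_cases h2 : c ∈ pvKeepL
    · have h' : ¬ (c ∈ (PySem.Set.ofList line.toList : PySem.Set Char) ∧ (c ∈ pvDigitsL ∨ c ∉ pvKeepL)) := by
        simp [h1, h2]
      rw [if_neg h', PySem.Dict.get?_empty]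
      simp [pvF, h1, (pv_mem_good_iff c).mpr (Or.inr h2)]
    · rw [if_pos ⟨hcL, Or.inr h2⟩, if_neg h1]
      have hng : c ∉ pvGoodL := fun hg => by
        rcases (pv_mem_good_iff c).mp hg with h|h
        · exact h1 h
        · exact h2 h
      simp [pvF, h1, hng]

-- ===== VERDICT (by name: the statement is the Claim_ definition above) =====
theorem preprocess_line_spec : Claim_equal_preprocess_line := by
  intro line _
  unfold Spec_preprocess_line
  rw [pvA_eq, pvB_eq]
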